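-- pv_equiv track=rewrite | github.com/orianek1/Contact-tracing | CPSC217F20A4-OrianeKacoutie.py | tastiest
-- ===== SOURCE A (Python) =====
-- def tastiest(nameDictionary):
--
--     # new list of people thst are the most infected
--     tastiestList = []
-- #this is a new list v=creates wher all the sick people present in the dictionary will be store
--     all_sick = []
--     #this is to loop throught the values present in the dictionary
--     for values in nameDictionary.values():
--         for item in values:
--             all_sick.append(item)
--
--     # I got the code to count the frequency on https://www.geeksforgeeks.org/counting-the-frequencies-in-a-list-using-dictionary-in-python/
--     #the code ends at line 146
--     #To create an empty dictionary
--     frequency_sickPeople={}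
-- #this is to loop through the people in the new list with all the sick people
--     for item in all_sick:
-- #this is to count the frequency at which the elelemtn is present in teh dictionary
--         if (item in frequency_sickPeople):
--             frequency_sickPeople[item] += 1
--         else:
--             frequency_sickPeople[item] = 1
--
--     #this is to find the larger frequency
--     max_frequency = 0
--
--     for values in frequency_sickPeople.values():
--         if values > max_frequency:
--             max_frequency = values
--
--     for key in frequency_sickPeople:
--         if frequency_sickPeople[key] == max_frequency:
--             tastiestList.append(key)
--
--     return (tastiestList)
-- ===== SOURCE B (Python) =====
-- def tastiest(nameDictionary):
--     # Build the frequency dict, then RANK the (name, count) pairs by descending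
--     # count with a stable sort; the answer is the leading run of the ranking
--     # (stability keeps tied names in dict-insertion order, matching A).
--     frequency = {}
--     for names in nameDictionary.values():
--         for name in names:
--             frequency[name] = frequency.get(name, 0) + 1
--     ranked = sorted(frequency.items(), key=lambda kv: -kv[1])
--     if not ranked:
--         return []
--     top = ranked[0][1]
--     winners = []
--     for name, count in ranked:
--         if count != top:
--             break
--         winners.append(name)
--     return winners
-- ===== Notes on version B (the rewrite author's own statement) =====
-- stated objective: alternative
-- what changed: B replaces A's flatten-then-count plus max-scan plus filter passes by counting directly while walking the dictionary and then stably sorting the (name,count) pairs by descending count, returning the leading run of equal counts (stability preserves A's dict-insertion tie order).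
import Mathlib
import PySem

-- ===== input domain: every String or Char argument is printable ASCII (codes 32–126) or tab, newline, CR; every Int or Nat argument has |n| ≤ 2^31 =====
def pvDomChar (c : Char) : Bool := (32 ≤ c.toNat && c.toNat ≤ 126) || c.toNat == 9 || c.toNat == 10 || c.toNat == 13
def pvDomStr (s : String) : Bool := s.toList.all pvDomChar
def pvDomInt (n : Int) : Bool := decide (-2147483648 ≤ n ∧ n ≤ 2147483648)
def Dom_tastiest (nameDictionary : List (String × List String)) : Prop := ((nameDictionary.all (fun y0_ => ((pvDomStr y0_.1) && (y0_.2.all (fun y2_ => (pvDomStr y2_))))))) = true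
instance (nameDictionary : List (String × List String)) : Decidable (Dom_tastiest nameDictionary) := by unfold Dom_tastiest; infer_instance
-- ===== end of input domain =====

-- B replaces A's max-scan + filter over the frequency dict by a stable sort of the
-- (name, count) pairs on descending count and takes the leading run (objective: alternative).


-- ===== PORT A =====
def tastiest (nameDictionary : List (String × List String)) : List String :=
  -- all_sick: append every name from every value list
  let allSick : List String :=
    nameDictionary.foldl (fun acc kv => kv.2.foldl (fun acc item => acc ++ [item]) acc) []
  -- frequency dict: if item in d: d[item] += 1 else: d[item] = 1
  let freq : PySem.Dict String Int :=
    allSick.foldl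
      (fun f item => if f.contains item then f.modify item 0 (· + 1) else f.insert item 1)
      PySem.Dict.empty
  -- max_frequency scan over the values
  let maxF : Int := freq.values.foldl (fun m v => if v > m then v else m) 0
  -- collect keys whose count equals max_frequency
  freq.keys.foldl (fun acc k => if freq.getD k 0 == maxF then acc ++ [k] else acc) []

-- ===== PORT B =====
-- the break-loop 'for name, count in ranked: if count != top: break; winners.append(name)'
def pvCollectTop (top : Int) : List (String × Int) → List String
  | [] => []
  | p :: t => if p.2 ≠ top then [] else p.1 :: pvCollectTop top t

def tastiest_alt (nameDictionary : List (String × List String)) : List String :=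
  -- frequency[name] = frequency.get(name, 0) + 1
  let freq : PySem.Dict String Int :=
    nameDictionary.foldl
      (fun f kv => kv.2.foldl (fun f name => f.insert name (f.getD name 0 + 1)) f)
      PySem.Dict.empty
  -- ranked = sorted(frequency.items(), key=lambda kv: -kv[1])  (stable)
  let ranked := PySem.List.sorted freq.items (fun kv => -kv.2) false
  match ranked with
  | [] => []
  | p :: _ => pvCollectTop p.2 ranked

-- ===== PRECONDITION & SPEC =====
def Spec_tastiest (nameDictionary : List (String × List String)) (out : List String) : Prop := out = tastiest_alt nameDictionary
instance (nameDictionary : List (String × List String)) (out : List String) : Decidable (Spec_tastiest nameDictionary out) := by unfold Spec_tastiest; infer_instance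

-- ===== CLAIM (what is proved, stated in full; the proofs are below) =====
def Claim_equal_tastiest : Prop := ∀ (nameDictionary : List (String × List String)), Dom_tastiest nameDictionary → Spec_tastiest nameDictionary (tastiest nameDictionary)

-- ===== LEMMAS AND PROOFS =====

-- A's "if v > m then v else m" is max
theorem ifgt_eq_max (m v : Int) : (if v > m then v else m) = max m v := by
  rcases le_or_gt v m with h | h
  · simp [max_eq_left h, not_lt.mpr h]
  · simp [max_eq_right (le_of_lt h), h]

-- both frequency builds are Counter(flattened names)
theorem freqA_eq_counter (xs : List String) :
    xs.foldl
      (fun f item => if f.contains item then f.modify item 0 (· + 1) else f.insert item 1)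
      PySem.Dict.empty = PySem.Dict.counter xs := by
  rw [PySem.Dict.counter_eq_foldl]
  apply PySem.List.foldl_congr_mem
  intro f x _
  by_cases h : f.contains x = true
  · simp [h, PySem.Dict.modify]
  · simp [h, PySem.Dict.modify,
      PySem.Dict.getD_of_not_contains f (0 : Int) (by simpa using h)]

theorem freqB_eq_counter (d : List (String × List String)) :
    d.foldl
      (fun f kv => kv.2.foldl (fun f name => f.insert name (f.getD name 0 + 1)) f)
      PySem.Dict.empty = PySem.Dict.counter ((d.map (·.2)).flatten) := by
  rw [← PySem.Dict.foldl_insert_getD_add_one_eq_counter, List.foldl_flatten, List.foldl_map]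

theorem allSick_eq_flatten (d : List (String × List String)) :
    d.foldl (fun acc kv => kv.2.foldl (fun acc item => acc ++ [item]) acc) []
      = (d.map (·.2)).flatten := by
  have h : d.foldl (fun acc kv => kv.2.foldl (fun acc item => acc ++ [item]) acc) []
      = d.foldl (fun acc kv => acc ++ kv.2) [] := by
    apply PySem.List.foldl_congr_mem
    intro acc kv _
    exact PySem.List.foldl_append_singleton kv.2 acc
  rw [h, PySem.List.foldl_append_eq_flatMap (fun kv => kv.2) d [], List.flatMap_def]
  rfl

-- B's break-loop is takeWhile-then-project
theorem pvCollectTop_eq (top : Int) (l : List (String × Int)) :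
    pvCollectTop top l = (l.takeWhile (fun p => p.2 == top)).map (·.1) := by
  induction l with
  | nil => rfl
  | cons p t ih =>
    by_cases h : p.2 = top
    · simp [pvCollectTop, h, ih]
    · simp [pvCollectTop, h]

-- appending one element to the input of the insertion sort
theorem sorted_snoc {α : Type} (key : α → Int) (xs : List α) (x : α) :
    PySem.List.sorted (xs ++ [x]) key false
      = PySem.List.insertBy (fun a b => decide (key a < key b)) x
          (PySem.List.sorted xs key false) := by
  rw [PySem.List.sorted_eq_foldl_insertBy, PySem.List.sorted_eq_foldl_insertBy,
    List.foldl_append]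
  rfl

-- STABILITY at the minimal key: inserting x into a sorted list all of whose keys are ≥ b
-- extends the key-= b prefix by x exactly when key x = b
theorem takeWhile_insertBy {α : Type} (key : α → Int) (b : Int) (x : α) (S : List α)
    (hpw : S.Pairwise (fun a c => key a ≤ key c)) (hge : ∀ y ∈ S, b ≤ key y) (hx : b ≤ key x) :
    ((PySem.List.insertBy (fun a c => decide (key a < key c)) x S).takeWhile
        (fun y => key y == b))
      = if key x == b then S.takeWhile (fun y => key y == b) ++ [x]
        else S.takeWhile (fun y => key y == b) := by
  induction S with
  | nil => by_cases h : key x = b <;> simp [PySem.List.insertBy, h]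
  | cons y t ih =>
    rcases List.pairwise_cons.mp hpw with ⟨hyt, hpt⟩
    have hyb : b ≤ key y := hge y (List.mem_cons_self ..)
    simp only [PySem.List.insertBy]
    by_cases hlt : key x < key y
    · have hyne : ¬ key y = b := by omega
      by_cases hxb : key x = b
      · simp [hxb, hyne, show b < key y by omega]
      · simp [hlt, hxb, hyne]
    · by_cases hyb' : key y = b
      · have := ih hpt (fun z hz => hge z (List.mem_cons_of_mem _ hz))
        by_cases hxb : key x = b <;>
          simp [hyb', this, hxb, show ¬ key x < b by omega]
      · have hxne : ¬ key x = b := by have := not_lt.mp hlt; omega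
        simp [hlt, hyb', hxne]

-- stable sort keeps the minimal-key elements as a prefix in their original order
theorem takeWhile_sorted_eq_filter {α : Type} (key : α → Int) (b : Int) (xs : List α)
    (h : ∀ y ∈ xs, b ≤ key y) :
    (PySem.List.sorted xs key false).takeWhile (fun y => key y == b)
      = xs.filter (fun y => key y == b) := by
  induction xs using List.reverseRecOn with
  | nil => rfl
  | append_singleton xs x ih =>
    have hx : b ≤ key x := h x (by simp)
    have h' : ∀ y ∈ xs, b ≤ key y := fun y hy => h y (by simp [hy])
    rw [sorted_snoc, takeWhile_insertBy key b x _ (PySem.List.sorted_pairwise xs key)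
        (fun y hy => h' y ((PySem.List.mem_sorted _ _ _ _).mp hy)) hx, ih h', List.filter_append]
    by_cases hxb : key x = b <;> simp [hxb]

-- the running-maximum fold is bounded by any upper bound of the projected values
theorem runMax_le (l : List (String × Int)) (c : Int) : ∀ m, m ≤ c → (∀ y ∈ l, y.2 ≤ c) →
    l.foldl (fun m p => max m p.2) m ≤ c := by
  induction l with
  | nil => intro m hm _; simpa using hm
  | cons p t ih =>
    intro m hm h
    simp only [List.foldl_cons]
    exact ih _ (by have := h p (List.mem_cons_self ..); omega)
      (fun y hy => h y (List.mem_cons_of_mem _ hy))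

theorem tastiest_eq (d : List (String × List String)) : tastiest d = tastiest_alt d := by
  unfold tastiest tastiest_alt
  simp only [allSick_eq_flatten, freqA_eq_counter, freqB_eq_counter]
  set xs := (d.map (·.2)).flatten with hxs
  set c := PySem.Dict.counter xs with hc
  have hnd : c.keys.Nodup := PySem.Dict.nodup_keys_counter xs
  set l := c.items with hl
  -- A's max fold over the values is the running max over the items
  have hvals : c.values = l.map (·.2) := rfl
  have hA :
      c.values.foldl (fun m v => if v > m then v else m) 0
        = l.foldl (fun m p => max m p.2) 0 := by
    rw [hvals, List.foldl_map]
    apply PySem.List.foldl_congr_mem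
    intro m p _
    exact ifgt_eq_max m p.2
  rw [hA]
  set M := l.foldl (fun m p => max m p.2) 0 with hM
  -- A's collection loop = filter over items, projected to keys
  have hAout :
      c.keys.foldl (fun acc k => if c.getD k 0 == M then acc ++ [k] else acc) []
        = (l.filter (fun p => p.2 == M)).map (·.1) := by
    have h := PySem.List.foldl_append_if (fun k => c.getD k 0 == M) id c.keys []
    simp only [id_eq] at h
    rw [h, hl, PySem.Dict.items_eq_map_keys c hnd 0, List.filter_map, List.map_map]
    simp [Function.comp_def]
  rw [hAout]
  -- every item's count is positive
  have hpos : ∀ y ∈ l, 1 ≤ y.2 := by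
    intro y hy
    rw [hl, PySem.Dict.items_counter] at hy
    rcases List.mem_map.mp hy with ⟨k, hk, hek⟩
    have hkx : k ∈ xs := (PySem.Set.mem_ofList _ _).mp hk
    have : 0 < xs.count k := List.count_pos_iff.mpr hkx
    rw [← hek]
    show (1 : Int) ≤ (xs.count k : Int)
    exact_mod_cast this
  -- B side
  rcases hS : PySem.List.sorted l (fun kv => -kv.2) false with _ | ⟨p, t⟩
  · have hlnil : l = [] := (PySem.List.sorted_eq_nil_iff _ _ _).mp hS
    simp [hlnil]
  · have hple : ∀ y ∈ l, y.2 ≤ p.2 := by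
      intro y hy
      have := PySem.List.key_head_sorted_le l (fun kv => -kv.2) hS y hy
      simpa using this
    have hpml : p ∈ l := (PySem.List.mem_sorted _ _ _ _).mp (by rw [hS]; exact List.mem_cons_self ..)
    -- the head's count is the running max
    have hMp : M = p.2 := by
      have h1 : M ≤ p.2 := runMax_le l p.2 0 (by have := hpos p hpml; omega) hple
      have h2 : p.2 ≤ M := (PySem.List.le_foldl_max_int l (·.2) 0).2 p hpml
      omega
    -- stability: the leading run of the sort is the filter in original order
    have hstable :
        (PySem.List.sorted l (fun kv => -kv.2) false).takeWhile (fun y => -y.2 == -p.2)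
          = l.filter (fun y => -y.2 == -p.2) :=
      takeWhile_sorted_eq_filter (fun kv => -kv.2) (-p.2) l
        (fun y hy => by have := hple y hy; show -p.2 ≤ -y.2; omega)
    have hpred : (fun y : String × Int => (y.2 == p.2)) = (fun y => -y.2 == -p.2) := by
      funext y; simp [neg_inj]
    have hpredf :
        l.filter (fun y => -y.2 == -p.2) = l.filter (fun y => y.2 == M) := by
      apply List.filter_congr; intro y _
      simp [neg_inj, hMp]
    show List.map (fun x => x.1) (List.filter (fun p => p.2 == M) l) = pvCollectTop p.2 (p :: t)
    rw [pvCollectTop_eq, ← hS, hpred, hstable, hpredf]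

-- ===== VERDICT (by name: the statement is the Claim_ definition above) =====
theorem tastiest_spec : Claim_equal_tastiest := by
  intro d _
  unfold Spec_tastiest
  exact tastiest_eq d
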